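-- pv_equiv track=rewrite | github.com/amirouche/triangle | main.py | string2xchars
-- ===== SOURCE A (Python) =====
-- from collections import namedtuple
--
-- Annotation = namedtuple('Annotation', 'offset line column')
--
-- XChar = namedtuple('XChar', 'char annotation')
--
-- def string2xchars(string):
--     line = 0
--     column = 0
--     for offset, char in enumerate(string):
--         char = string[offset]
--
--         yield XChar(char, Annotation(offset, line, column))
--
--         if char == '\n':
--             line += 1
--             column = 0
--         else:
--             column += 1
-- ===== SOURCE B (Python) =====
-- from collections import namedtuple
--
-- Annotation = namedtuple('Annotation', 'offset line column')
--
-- XChar = namedtuple('XChar', 'char annotation')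
--
-- def string2xchars(string):
--     segments = string.split('\n')
--     last = len(segments) - 1
--     offset = 0
--     for line, segment in enumerate(segments):
--         for column, char in enumerate(segment):
--             yield XChar(char, Annotation(offset, line, column))
--             offset += 1
--         if line != last:
--             yield XChar('\n', Annotation(offset, line, len(segment)))
--             offset += 1
-- ===== Notes on version B (the rewrite author's own statement) =====
-- stated objective: alternative
-- what changed: B splits the string on '\n' once and derives line from the segment index and column from the in-segment position (re-emitting a '\n' between consecutive segments), instead of A's flat pass mutating line/column counters per character.
import Mathlib
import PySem

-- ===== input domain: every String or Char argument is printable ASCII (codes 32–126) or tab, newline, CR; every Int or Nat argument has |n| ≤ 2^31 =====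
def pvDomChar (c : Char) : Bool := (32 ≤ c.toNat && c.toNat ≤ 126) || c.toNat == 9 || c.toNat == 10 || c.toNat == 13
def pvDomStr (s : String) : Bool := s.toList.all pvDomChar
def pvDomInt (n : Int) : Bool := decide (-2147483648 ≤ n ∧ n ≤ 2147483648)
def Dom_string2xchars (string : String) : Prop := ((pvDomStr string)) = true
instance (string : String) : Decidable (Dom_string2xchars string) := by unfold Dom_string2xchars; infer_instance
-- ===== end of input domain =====

-- B re-derives line/column by splitting on '\n' (segment index = line, in-segment index
-- = column) instead of A's flat counter-mutating pass; same cost, different decomposition.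

-- ===== PORT A =====
-- A's loop over enumerate(string): offset is the running index, line/column the mutated
-- counters.  (A's `char = string[offset]` re-reads the same character enumerate yielded,
-- so the ported loop carries the character directly.)
def string2xcharsLoop : List Char → Int → Int → Int → List (String × (Int × Int × Int))
  | [], _, _, _ => []
  | c :: rest, offset, line, column =>
    (String.ofList [c], (offset, line, column)) ::
      (if c = '\n' then string2xcharsLoop rest (offset + 1) (line + 1) 0
       else string2xcharsLoop rest (offset + 1) line (column + 1))

def string2xchars (string : String) : List (String × (Int × Int × Int)) :=
  string2xcharsLoop string.toList 0 0 0

-- ===== PORT B =====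
-- inner loop: `for column, char in enumerate(segment)` with the running offset threaded
def string2xcharsInner : List Char → Int → Int → Int → List (String × (Int × Int × Int))
  | [], _, _, _ => []
  | c :: rest, offset, line, column =>
    (String.ofList [c], (offset, line, column)) :: string2xcharsInner rest (offset + 1) line (column + 1)

-- outer loop: `for line, segment in enumerate(segments)`, a '\n' emitted after every
-- segment except the last (`if line != last`)
def string2xcharsOuter : List (List Char) → Int → Int → List (String × (Int × Int × Int))
  | [], _, _ => []
  | [seg], line, offset => string2xcharsInner seg offset line 0
  | seg :: rest, line, offset =>
    string2xcharsInner seg offset line 0 ++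
      ("\n", (offset + seg.length, line, (seg.length : Int))) ::
        string2xcharsOuter rest (line + 1) (offset + seg.length + 1)

def string2xchars_alt (string : String) : List (String × (Int × Int × Int)) :=
  string2xcharsOuter (PySem.Chars.splitOn string.toList ['\n']) 0 0

-- ===== PRECONDITION & SPEC =====
def Spec_string2xchars (string : String) (out : List (String × (Int × Int × Int))) : Prop := out = string2xchars_alt string
instance (string : String) (out : List (String × (Int × Int × Int))) : Decidable (Spec_string2xchars string out) := by unfold Spec_string2xchars; infer_instance

-- ===== CLAIM (what is proved, stated in full; the proofs are below) =====
def Claim_equal_string2xchars : Prop := ∀ (string : String), Dom_string2xchars string → Spec_string2xchars string (string2xchars string)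

-- ===== LEMMAS AND PROOFS =====

-- proof-side characterisation of splitOn on the single-character separator '\n':
-- pvSegs cs = (first segment, remaining segments)
def pvSegs : List Char → List Char × List (List Char)
  | [] => ([], [])
  | c :: rest =>
    let p := pvSegs rest
    if c = '\n' then ([], p.1 :: p.2) else (c :: p.1, p.2)

theorem pvSplitOn_go_spec (cs : List Char) : ∀ (fuel : Nat), cs.length ≤ fuel →
    ∀ (cur : List Char) (acc : List (List Char)),
    PySem.Chars.splitOn.go ['\n'] fuel cs cur acc
      = acc.reverse ++ (cur.reverse ++ (pvSegs cs).1) :: (pvSegs cs).2 := by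
  induction cs with
  | nil =>
    intro fuel _ cur acc
    cases fuel <;> simp [PySem.Chars.splitOn.go, pvSegs]
  | cons c rest ih =>
    intro fuel hf cur acc
    cases fuel with
    | zero => simp at hf
    | succ f =>
      have hf' : rest.length ≤ f := by simpa using hf
      by_cases hc : c = '\n'
      · subst hc
        simp only [PySem.Chars.splitOn.go, List.isPrefixOf]
        rw [if_pos (by simp)]
        rw [show List.drop ['\n'].length ('\n' :: rest) = rest from rfl]
        rw [ih f hf' [] (cur.reverse :: acc)]
        simp [pvSegs]
      · simp only [PySem.Chars.splitOn.go, List.isPrefixOf_iff_prefix]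
        rw [if_neg (by simp [List.prefix_cons_iff]; exact fun h => hc h.symm)]
        rw [ih f hf' (c :: cur) acc]
        simp [pvSegs, hc]

theorem pvSplitOn_spec (cs : List Char) :
    PySem.Chars.splitOn cs ['\n'] = (pvSegs cs).1 :: (pvSegs cs).2 := by
  unfold PySem.Chars.splitOn
  rw [pvSplitOn_go_spec cs (cs.length + 1) (by omega) [] []]
  simp

-- main invariant: A's flat loop equals B's inner loop on the first segment followed by
-- the separator record and B's outer loop on the remaining segments
theorem pvMain (cs : List Char) : ∀ (offset line column : Int),
    string2xcharsLoop cs offset line column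
      = string2xcharsInner (pvSegs cs).1 offset line column ++
          (match (pvSegs cs).2 with
           | [] => []
           | ss => ("\n", (offset + (pvSegs cs).1.length, line, column + (pvSegs cs).1.length)) ::
               string2xcharsOuter ss (line + 1) (offset + (pvSegs cs).1.length + 1)) := by
  induction cs with
  | nil => intro offset line column; simp [pvSegs, string2xcharsLoop, string2xcharsInner]
  | cons c rest ih =>
    intro offset line column
    by_cases hc : c = '\n'
    · subst hc
      simp only [string2xcharsLoop, pvSegs]
      rw [ih (offset + 1) (line + 1) 0]
      cases h2 : (pvSegs rest).2 with
      | nil =>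
        simp [string2xcharsInner, string2xcharsOuter]
      | cons s2 ss2 =>
        cases ss2 <;> simp [string2xcharsOuter, string2xcharsInner]
    · simp only [string2xcharsLoop, if_neg hc, pvSegs]
      rw [ih (offset + 1) line (column + 1)]
      simp only [string2xcharsInner, List.length_cons]
      cases h2 : (pvSegs rest).2 with
      | nil => simp
      | cons s2 ss2 =>
        simp only [List.cons_append]
        push_cast
        ring_nf

-- ===== VERDICT (by name: the statement is the Claim_ definition above) =====
theorem string2xchars_spec : Claim_equal_string2xchars := by
  intro s _
  unfold Spec_string2xchars string2xchars string2xchars_alt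
  rw [pvSplitOn_spec, pvMain]
  cases h2 : (pvSegs s.toList).2 with
  | nil => simp [string2xcharsOuter]
  | cons s2 ss2 =>
    cases ss2 <;> simp [string2xcharsOuter]
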